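-- pv_equiv track=rewrite | github.com/Ytteles/test_Performance_Lab | task1/task1.py | find_cyclic_path
-- ===== SOURCE A (Python) =====
-- def find_cyclic_path(n: int, m: int) -> list[int]:
--     if n == 0:
--         return []
--     i = 1
--     res = []
--     while True:
--         res.append(i)
--         i = 1 + (i + m - 2) % n
--         if i == 1:
--             break
--     return res
-- ===== SOURCE B (Python) =====
-- def find_cyclic_path(n: int, m: int) -> list[int]:
--     if n == 0:
--         return []
--     d = (m - 1) % n
--     a, b = abs(n), abs(d)
--     while b:
--         a, b = b, a % b
--     count = abs(n) // a
--     return [1 + (k * d) % n for k in range(count)]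
-- ===== Notes on version B (the rewrite author's own statement) =====
-- stated objective: alternative
-- what changed: B replaces A's iterate-until-the-index-returns-to-1 loop by computing the cycle length up front as abs(n)//gcd(abs(n),abs((m-1)%n)) and emitting each position by the closed-form index formula 1+(k*d)%n.
import Mathlib
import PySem

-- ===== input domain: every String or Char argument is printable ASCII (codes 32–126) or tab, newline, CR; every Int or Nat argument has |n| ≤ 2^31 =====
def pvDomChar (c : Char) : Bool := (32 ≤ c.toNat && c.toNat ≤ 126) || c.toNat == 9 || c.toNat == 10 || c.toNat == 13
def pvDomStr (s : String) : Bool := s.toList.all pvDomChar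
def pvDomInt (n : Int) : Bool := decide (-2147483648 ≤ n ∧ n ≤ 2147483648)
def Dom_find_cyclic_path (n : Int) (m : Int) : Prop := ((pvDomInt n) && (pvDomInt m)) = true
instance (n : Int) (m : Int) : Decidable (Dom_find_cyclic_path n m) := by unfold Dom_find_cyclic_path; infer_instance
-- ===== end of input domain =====

-- B computes the cycle length up front via gcd and emits positions by a closed-form index
-- formula, instead of iterating the step map until it returns to 1 (an alternative algorithm
-- of the same cost: the output list itself has that length).

-- ===== PORT A =====
-- A's 'while True' loop; the fuel n.natAbs is a totality guard only (the loop breaks after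
-- exactly |n|/gcd(|n|,|(m-1)%n|) ≤ |n| iterations, proved below).
def findLoopA (n m : Int) : Nat → Int → List Int → List Int
  | 0, _, res => res
  | fuel+1, i, res =>
    let res' := res ++ [i]
    let i' := 1 + PySem.Int.mod (i + m - 2) n
    if i' = 1 then res' else findLoopA n m fuel i' res'

def find_cyclic_path (n : Int) (m : Int) : List Int :=
  if n = 0 then [] else findLoopA n m n.natAbs 1 []

-- ===== PORT B =====
-- Source B's hand-written Euclid loop 'while b: a, b = b, a % b' (arguments are nonnegative ints)
def gcdLoop : Nat → Nat → Nat
  | a, 0 => a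
  | a, b+1 => gcdLoop (b+1) (a % (b+1))
termination_by a b => b
decreasing_by exact Nat.mod_lt _ (Nat.succ_pos b)

def find_cyclic_path_alt (n : Int) (m : Int) : List Int :=
  if n = 0 then [] else
    let d := PySem.Int.mod (m - 1) n
    let g := gcdLoop n.natAbs d.natAbs
    let count := PySem.Int.floordiv |n| (g : Int)
    (PySem.List.pyRange 0 count 1).map (fun k => 1 + PySem.Int.mod (k * d) n)

-- ===== PRECONDITION & SPEC =====
def Spec_find_cyclic_path (n : Int) (m : Int) (out : List Int) : Prop := out = find_cyclic_path_alt n m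
instance (n : Int) (m : Int) (out : List Int) : Decidable (Spec_find_cyclic_path n m out) := by unfold Spec_find_cyclic_path; infer_instance

-- ===== CLAIM (what is proved, stated in full; the proofs are below) =====
def Claim_equal_find_cyclic_path : Prop := ∀ (n : Int) (m : Int), Dom_find_cyclic_path n m → Spec_find_cyclic_path n m (find_cyclic_path n m)

-- ===== LEMMAS AND PROOFS =====

-- the value of the loop index minus 1 after k steps: (k*(m-1)) mod n (Python mod = Int.fmod)
def Fv (n m : Int) (k : Nat) : Int := Int.fmod ((k : Int) * (m - 1)) n

-- the cycle length
def cnt (n m : Int) : Nat := n.natAbs / Nat.gcd n.natAbs ((m - 1).fmod n).natAbs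

lemma fmod_congr (a b n : Int) (h : n ∣ a - b) : a.fmod n = b.fmod n := by
  have he : a % n = b % n :=
    Int.emod_eq_emod_iff_emod_sub_eq_zero.mpr (Int.emod_eq_zero_of_dvd h)
  have hd : (n ∣ a) ↔ (n ∣ b) := by
    constructor
    · intro hx; have := dvd_sub hx h; simpa using this
    · intro hx; have := dvd_add hx h; simpa using this
  rw [Int.fmod_eq_emod, Int.fmod_eq_emod, he,
      if_congr (or_congr Iff.rfl hd) rfl rfl]

lemma dvd_fmod_sub_self (a n : Int) : n ∣ a.fmod n - a := by
  have h := Int.fmod_add_mul_fdiv a n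
  exact ⟨-(a.fdiv n), by linarith⟩

lemma gcdLoop_eq (a b : Nat) : gcdLoop a b = Nat.gcd a b := by
  fun_induction gcdLoop with
  | case1 a => simp [Nat.gcd_zero_right]
  | case2 a b ih =>
    rw [ih, Nat.gcd_comm (b+1) (a % (b+1)), ← Nat.gcd_rec, Nat.gcd_comm]

lemma dvd_mul_iff_div_gcd_dvd (a b k : Nat) (ha : a ≠ 0) :
    a ∣ k * b ↔ (a / Nat.gcd a b) ∣ k := by
  set g := Nat.gcd a b with hg
  have hgpos : 0 < g := Nat.gcd_pos_of_pos_left b (Nat.pos_of_ne_zero ha)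
  have hga : g ∣ a := Nat.gcd_dvd_left a b
  have hgb : g ∣ b := Nat.gcd_dvd_right a b
  have ha' : g * (a / g) = a := Nat.mul_div_cancel' hga
  have hb' : g * (b / g) = b := Nat.mul_div_cancel' hgb
  have cop : Nat.Coprime (a / g) (b / g) :=
    Nat.coprime_div_gcd_div_gcd hgpos
  constructor
  · intro h
    have hkb : k * b = g * (k * (b / g)) := by
      rw [show g * (k * (b / g)) = k * (g * (b / g)) from by ring, hb']
    have h2 : g * (a / g) ∣ g * (k * (b / g)) := by
      rw [ha', ← hkb]; exact h
    have h3 : (a / g) ∣ k * (b / g) :=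
      (Nat.mul_dvd_mul_iff_left hgpos).mp h2
    exact cop.dvd_of_dvd_mul_right h3
  · intro h
    have h1 : a ∣ k * g := by
      rw [← ha']
      calc g * (a / g) ∣ g * k := Nat.mul_dvd_mul_left g h
        _ = k * g := by ring
    exact h1.trans (Nat.mul_dvd_mul_left k hgb)

lemma Fv_zero_iff (n m : Int) (hn : n ≠ 0) (k : Nat) :
    Fv n m k = 0 ↔ cnt n m ∣ k := by
  have hcong : ((k : Int) * (m - 1)).fmod n = ((k : Int) * ((m - 1).fmod n)).fmod n := by
    apply fmod_congr
    have h1 : n ∣ (m - 1) - (m - 1).fmod n := by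
      obtain ⟨c, hc⟩ := dvd_fmod_sub_self (m - 1) n
      exact ⟨-c, by linarith⟩
    have : n ∣ (k : Int) * ((m - 1) - (m - 1).fmod n) := Dvd.dvd.mul_left h1 _
    have h2 : (k : Int) * (m - 1) - (k : Int) * ((m - 1).fmod n)
        = (k : Int) * ((m - 1) - (m - 1).fmod n) := by ring
    rw [h2]; exact this
  unfold Fv cnt
  rw [hcong]
  set D := (m - 1).fmod n with hD
  have h0 : ((k : Int) * D).fmod n = 0 ↔ n ∣ (k : Int) * D := by
    constructor
    · intro h
      have := Int.fmod_add_mul_fdiv ((k : Int) * D) n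
      exact ⟨((k : Int) * D).fdiv n, by linarith⟩
    · intro ⟨c, hc⟩
      rw [hc, mul_comm]
      exact Int.mul_fmod_left c n
  rw [h0]
  have hnat : n ∣ (k : Int) * D ↔ n.natAbs ∣ k * D.natAbs := by
    rw [← Int.natAbs_dvd_natAbs, Int.natAbs_mul, Int.natAbs_natCast]
  rw [hnat]
  exact dvd_mul_iff_div_gcd_dvd n.natAbs D.natAbs k (Int.natAbs_ne_zero.mpr hn)

lemma cnt_pos (n m : Int) (hn : n ≠ 0) : 0 < cnt n m := by
  unfold cnt
  have ha : 0 < n.natAbs := Int.natAbs_pos.mpr hn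
  exact Nat.div_pos (Nat.le_of_dvd ha (Nat.gcd_dvd_left _ _))
    (Nat.gcd_pos_of_pos_left _ ha)

lemma step_eq (n m : Int) (k : Nat) :
    1 + PySem.Int.mod ((1 + Fv n m k) + m - 2) n = 1 + Fv n m (k + 1) := by
  unfold PySem.Int.mod Fv
  congr 1
  apply fmod_congr
  have h1 : n ∣ ((k : Int) * (m - 1)).fmod n - (k : Int) * (m - 1) :=
    dvd_fmod_sub_self _ n
  have h2 : (1 + ((k : Int) * (m - 1)).fmod n + m - 2) - ((((k : Nat) + 1 : Nat)) : Int) * (m - 1)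
      = ((k : Int) * (m - 1)).fmod n - (k : Int) * (m - 1) := by
    push_cast; ring
  rw [h2]; exact h1

lemma loop_eq (n m : Int) (hn : n ≠ 0) :
    ∀ (fuel k : Nat) (acc : List Int), k < cnt n m → cnt n m ≤ k + fuel →
    findLoopA n m fuel (1 + Fv n m k) acc
      = acc ++ (List.range (cnt n m - k)).map (fun j => 1 + Fv n m (k + j)) := by
  intro fuel
  induction fuel with
  | zero => intro k acc hk hfuel; omega
  | succ fuel ih =>
    intro k acc hk hfuel
    rw [findLoopA]
    simp only [step_eq n m k]
    by_cases hz : 1 + Fv n m (k + 1) = 1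
    · have hzero : Fv n m (k + 1) = 0 := by linarith [hz]
      have hdvd : cnt n m ∣ k + 1 := (Fv_zero_iff n m hn (k + 1)).mp hzero
      have hc : cnt n m = k + 1 :=
        le_antisymm (Nat.le_of_dvd (Nat.succ_pos k) hdvd) hk
      rw [if_pos hz]
      have : cnt n m - k = 1 := by omega
      simp [this]
    · have hzero : Fv n m (k + 1) ≠ 0 := by
        intro h; exact hz (by rw [h]; norm_num)
      have hndvd : ¬ cnt n m ∣ k + 1 := fun h => hzero ((Fv_zero_iff n m hn (k + 1)).mpr h)
      have hk1 : k + 1 < cnt n m := by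
        rcases Nat.lt_or_ge (k + 1) (cnt n m) with h | h
        · exact h
        · exfalso
          have : cnt n m = k + 1 := by omega
          exact hndvd (this ▸ dvd_refl _)
      rw [if_neg hz]
      rw [ih (k + 1) (acc ++ [1 + Fv n m k]) hk1 (by omega)]
      rw [List.append_assoc]
      congr 1
      have hck : cnt n m - k = (cnt n m - (k + 1)) + 1 := by omega
      rw [hck, List.range_succ_eq_map, List.map_cons, List.map_map,
          List.singleton_append]
      simp only [Nat.add_zero]
      congr 1
      apply List.map_congr_left
      intro j _
      simp only [Function.comp_apply]
      have hj : k + 1 + j = k + Nat.succ j := by omega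
      rw [hj]

lemma side_A (n m : Int) (hn : n ≠ 0) :
    find_cyclic_path n m = (List.range (cnt n m)).map (fun j => 1 + Fv n m j) := by
  unfold find_cyclic_path
  rw [if_neg hn]
  have hc1 : 0 < cnt n m := cnt_pos n m hn
  have hc2 : cnt n m ≤ n.natAbs := by
    unfold cnt; exact Nat.div_le_self _ _
  have h2 := loop_eq n m hn n.natAbs 0 [] hc1 (by omega)
  have h0 : Fv n m 0 = 0 := by unfold Fv; simp [Int.zero_fmod]
  rw [h0] at h2
  simp only [add_zero, List.nil_append, Nat.zero_add, Nat.sub_zero] at h2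
  exact h2

lemma side_B (n m : Int) (hn : n ≠ 0) :
    find_cyclic_path_alt n m = (List.range (cnt n m)).map (fun j => 1 + Fv n m j) := by
  unfold find_cyclic_path_alt
  rw [if_neg hn]
  simp only [gcdLoop_eq]
  have habs : |n| = (n.natAbs : Int) := Int.abs_eq_natAbs n
  have hcount : PySem.Int.floordiv |n| ((Nat.gcd n.natAbs ((PySem.Int.mod (m-1) n).natAbs) : Nat) : Int)
      = ((cnt n m : Nat) : Int) := by
    rw [habs, PySem.Int.floordiv_natCast]
    rfl
  rw [hcount, PySem.List.pyRange_one]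
  have htoNat : ((cnt n m : Int) - 0).toNat = cnt n m := by simp
  rw [htoNat, List.map_map]
  apply List.map_congr_left
  intro j _
  simp only [Function.comp_apply, zero_add]
  congr 1
  unfold PySem.Int.mod Fv
  apply fmod_congr
  have h1 : n ∣ (m - 1).fmod n - (m - 1) := dvd_fmod_sub_self (m - 1) n
  have h2 : (j : Int) * ((m - 1).fmod n) - (j : Int) * (m - 1)
      = (j : Int) * ((m - 1).fmod n - (m - 1)) := by ring
  rw [h2]
  exact Dvd.dvd.mul_left h1 _

-- ===== VERDICT (by name: the statement is the Claim_ definition above) =====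
theorem find_cyclic_path_spec : Claim_equal_find_cyclic_path := by
  intro n m _
  unfold Spec_find_cyclic_path
  by_cases hn : n = 0
  · subst hn; rfl
  · rw [side_A n m hn, side_B n m hn]
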